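-- pv_equiv track=rewrite | github.com/pssachdeva/measuring_hate_speech_llms | scripts/build_question_order_matched.py | _normalize_judge_id
-- ===== SOURCE A (Python) =====
-- def _normalize_judge_id(value: str) -> str:
--     """Normalize known order-condition suffixes away from judge ids."""
--
--     suffixes = (
--         "__original_order",
--         "__reverse_order",
--         "_original_order",
--         "_reverse_order",
--         "-original-order",
--         "-reverse-order",
--     )
--     for suffix in suffixes:
--         if value.endswith(suffix):
--             return value[: -len(suffix)]
--     return value
-- ===== SOURCE B (Python) =====
-- def _normalize_judge_id(value: str) -> str:
--     """Normalize known order-condition suffixes away from judge ids."""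
--     # Recognise the suffix by its grammar: sep + word + sep + "order",
--     # with word in {original, reverse} and sep in {_, -}; the underscore
--     # style may carry one extra leading underscore, stripped afterwards.
--     for word in ("original", "reverse"):
--         for sep in ("_", "-"):
--             tail = sep + word + sep + "order"
--             if value.endswith(tail):
--                 cut = len(value) - len(tail)
--                 if sep == "_" and value[:cut].endswith("_"):
--                     cut -= 1
--                 return value[:cut]
--     return value
-- ===== Notes on version B (the rewrite author's own statement) =====
-- stated objective: alternative
-- what changed: B replaces A's fixed six-suffix endswith chain by recognising the suffix grammar sep + word + sep + a fixed ending over word in {original,reverse} and sep in {_,-} (four composed tails) and stripping one extra leading underscore for the double-underscore variants.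
import Mathlib
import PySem

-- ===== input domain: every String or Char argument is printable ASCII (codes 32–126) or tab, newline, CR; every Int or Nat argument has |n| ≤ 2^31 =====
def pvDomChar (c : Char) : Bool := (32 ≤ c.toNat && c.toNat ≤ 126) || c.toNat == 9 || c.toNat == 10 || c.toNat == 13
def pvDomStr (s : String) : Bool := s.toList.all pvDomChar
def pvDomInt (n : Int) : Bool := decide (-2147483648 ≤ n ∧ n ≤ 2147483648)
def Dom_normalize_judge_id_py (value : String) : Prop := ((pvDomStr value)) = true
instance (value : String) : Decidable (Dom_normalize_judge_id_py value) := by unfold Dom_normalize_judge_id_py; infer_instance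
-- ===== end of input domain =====

-- B recognises the suffix by its grammar sep+word+sep+"order" (word ∈ {original,reverse},
-- sep ∈ {_,-}), stripping one extra leading underscore for the "__" variants, instead of
-- A's fixed six-suffix endswith chain (objective: alternative).

-- ===== PORT A =====
def pvSuffixes : List String :=
  ["__original_order", "__reverse_order", "_original_order",
   "_reverse_order", "-original-order", "-reverse-order"]

def pvStripFirst (value : String) : List String → String
  | [] => value
  | suffix :: rest =>
    if PySem.Str.endswith value suffix then
      PySem.Str.slice value none (some (-(PySem.Str.len suffix)))
    else pvStripFirst value rest

def normalize_judge_id_py (value : String) : String :=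
  pvStripFirst value pvSuffixes

-- ===== PORT B =====
def pvTail (word sep : String) : String :=
  String.ofList (sep.toList ++ word.toList ++ sep.toList ++ "order".toList)

-- value[:cut], first backing the cut up one place over an extra underscore
def pvCutAt (value sep : String) (cut : Int) : String :=
  if sep = "_" ∧ PySem.Str.endswith (PySem.Str.slice value none (some cut)) "_" then
    PySem.Str.slice value none (some (cut - 1))
  else
    PySem.Str.slice value none (some cut)

def pvScanSep (value word : String) : List String → Option String
  | [] => none
  | sep :: rest =>
    if PySem.Str.endswith value (pvTail word sep) then
      some (pvCutAt value sep (PySem.Str.len value - PySem.Str.len (pvTail word sep)))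
    else pvScanSep value word rest

def pvScanWord (value : String) : List String → Option String
  | [] => none
  | word :: rest =>
    match pvScanSep value word ["_", "-"] with
    | some r => some r
    | none => pvScanWord value rest

def normalize_judge_id_py_alt (value : String) : String :=
  (pvScanWord value ["original", "reverse"]).getD value

-- ===== PRECONDITION & SPEC =====
def Spec_normalize_judge_id_py (value : String) (out : String) : Prop := out = normalize_judge_id_py_alt value
instance (value : String) (out : String) : Decidable (Spec_normalize_judge_id_py value out) := by unfold Spec_normalize_judge_id_py; infer_instance

-- ===== CLAIM (what is proved, stated in full; the proofs are below) =====
def Claim_equal_normalize_judge_id_py : Prop := ∀ (value : String), Dom_normalize_judge_id_py value → Spec_normalize_judge_id_py value (normalize_judge_id_py value)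

-- ===== LEMMAS AND PROOFS =====

-- a one-longer suffix c::a sits on v iff a does and the char before it is c
lemma pvConsSuffix (c : Char) (a v : List Char) :
    (c :: a) <:+ v ↔ a <:+ v ∧ [c] <:+ v.take (v.length - a.length) := by
  constructor
  · rintro ⟨p, rfl⟩
    refine ⟨⟨p ++ [c], by simp⟩, ?_⟩
    rw [show (p ++ c :: a).length - a.length = p.length + 1 by simp; omega, List.take_append]
    simp
  · rintro ⟨⟨p, rfl⟩, hc⟩
    rw [show (p ++ a).length - a.length = p.length by simp, List.take_left] at hc
    obtain ⟨q, hq⟩ := hc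
    exact ⟨q, by rw [← hq]; simp⟩

lemma pvSliceTake (value : String) (k : Nat) :
    (PySem.Str.slice value none (some (k : Int))).toList = value.toList.take k := by
  rw [PySem.Str.toList_slice, PySem.Chars.slice_eq_listSlice,
    PySem.List.slice_to _ (by positivity)]
  simp

lemma pvOutEq (value : String) (k : Nat) (hk0 : 0 < k) (hk : k ≤ value.toList.length) :
    PySem.Str.slice value none (some (-(k : Int)))
      = PySem.Str.slice value none (some (PySem.Str.len value - (k : Int))) := by
  rw [← String.toList_inj, PySem.Str.toList_slice, PySem.Str.toList_slice,
    PySem.Chars.slice_eq_listSlice, PySem.Chars.slice_eq_listSlice,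
    PySem.List.slice_to_neg_natCast _ _ hk0,
    PySem.List.slice_to _ (by rw [PySem.Str.len_eq]; omega)]
  congr 1
  rw [PySem.Str.len_eq]; omega


lemma pvEndT {value t : String} (h : t.toList <:+ value.toList) :
    PySem.Str.endswith value t = true := by
  rw [PySem.Str.endswith_eq, PySem.Chars.endswith_iff]; exact h

lemma pvEndF {value t : String} (h : ¬ t.toList <:+ value.toList) :
    PySem.Str.endswith value t = false := by
  rw [← Bool.not_eq_true, PySem.Str.endswith_eq, PySem.Chars.endswith_iff]; exact h

lemma pvCutAtDash (value : String) (cut : Int) :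
    pvCutAt value "-" cut = PySem.Str.slice value none (some cut) := by
  unfold pvCutAt
  rw [if_neg]
  rintro ⟨h, -⟩
  exact absurd h (by decide)

lemma pvCutAtUnder (value : String) (cut : Int) :
    pvCutAt value "_" cut =
      if PySem.Str.endswith (PySem.Str.slice value none (some cut)) "_" = true then
        PySem.Str.slice value none (some (cut - 1))
      else PySem.Str.slice value none (some cut) := by
  unfold pvCutAt
  simp

lemma pvOut16 (value : String) (hk : 16 ≤ value.toList.length) :
    PySem.Str.slice value none (some (-16))
      = PySem.Str.slice value none (some (PySem.Str.len value - 16)) := by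
  exact_mod_cast pvOutEq value 16 (by norm_num) hk

lemma pvOut15 (value : String) (hk : 15 ≤ value.toList.length) :
    PySem.Str.slice value none (some (-15))
      = PySem.Str.slice value none (some (PySem.Str.len value - 15)) := by
  exact_mod_cast pvOutEq value 15 (by norm_num) hk

lemma pvOut14 (value : String) (hk : 14 ≤ value.toList.length) :
    PySem.Str.slice value none (some (-14))
      = PySem.Str.slice value none (some (PySem.Str.len value - 14)) := by
  exact_mod_cast pvOutEq value 14 (by norm_num) hk

lemma pvInner (value : String) (k : Nat) (hk : k ≤ value.toList.length) :
    (PySem.Str.endswith (PySem.Str.slice value none (some (PySem.Str.len value - (k : Int)))) "_" = true)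
      ↔ ['_'] <:+ value.toList.take (value.toList.length - k) := by
  rw [show PySem.Str.len value - (k : Int) = ((value.toList.length - k : Nat) : Int) from by
        rw [PySem.Str.len_eq]; push_cast [Nat.cast_sub hk]; ring,
    PySem.Str.endswith_eq, PySem.Chars.endswith_iff, pvSliceTake,
    show ("_".toList) = ['_'] from by decide]

lemma pvInner15 (value : String) (hk : 15 ≤ value.toList.length) :
    (PySem.Str.endswith (PySem.Str.slice value none (some (PySem.Str.len value - 15))) "_" = true)
      ↔ ['_'] <:+ value.toList.take (value.toList.length - 15) := by
  simpa using pvInner value 15 hk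

lemma pvInner14 (value : String) (hk : 14 ≤ value.toList.length) :
    (PySem.Str.endswith (PySem.Str.slice value none (some (PySem.Str.len value - 14))) "_" = true)
      ↔ ['_'] <:+ value.toList.take (value.toList.length - 14) := by
  simpa using pvInner value 14 hk

set_option maxHeartbeats 1600000 in
lemma pvKey (value : String) : normalize_judge_id_py value = normalize_judge_id_py_alt value := by
  have hT1 : pvTail "original" "_" = "_original_order" := by decide
  have hT2 : pvTail "original" "-" = "-original-order" := by decide
  have hT3 : pvTail "reverse" "_" = "_reverse_order" := by decide
  have hT4 : pvTail "reverse" "-" = "-reverse-order" := by decide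
  have hL1 : PySem.Str.len "_original_order" = 15 := by decide
  have hL2 : PySem.Str.len "-original-order" = 15 := by decide
  have hL3 : PySem.Str.len "_reverse_order" = 14 := by decide
  have hL4 : PySem.Str.len "-reverse-order" = 14 := by decide
  by_cases h3 : "_original_order".toList <:+ value.toList
  · have hn15 : 15 ≤ value.toList.length := by
      have := h3.length_le; simpa using this
    by_cases hu : ['_'] <:+ value.toList.take (value.toList.length - 15)
    · -- the double-underscore original variant
      have h1 : "__original_order".toList <:+ value.toList := by
        rw [show ("__original_order".toList) = '_' :: "_original_order".toList from by decide,
          pvConsSuffix]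
        exact ⟨h3, by simpa using hu⟩
      have hn16 : 16 ≤ value.toList.length := by
        have := h1.length_le; simpa using this
      simp only [normalize_judge_id_py, pvSuffixes, pvStripFirst, pvEndT h1,
        if_true, show PySem.Str.len "__original_order" = 16 from by decide]
      simp only [normalize_judge_id_py_alt, pvScanWord, pvScanSep, hT1, hL1, pvEndT h3,
        if_true, pvCutAtUnder, Option.getD_some]
      rw [if_pos ((pvInner15 value hn15).mpr hu), show (PySem.Str.len value - 15 - 1) = (PySem.Str.len value - 16) from by ring]
      exact pvOut16 value hn16
    · -- plain "_original_order"
      have h1 : ¬ "__original_order".toList <:+ value.toList := by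
        rw [show ("__original_order".toList) = '_' :: "_original_order".toList from by decide,
          pvConsSuffix]
        rintro ⟨-, hc⟩
        exact hu (by simpa using hc)
      have h2 : ¬ "__reverse_order".toList <:+ value.toList := fun h2 =>
        absurd (List.suffix_of_suffix_length_le h2 h3 (by decide)) (by decide)
      simp only [normalize_judge_id_py, pvSuffixes, pvStripFirst, pvEndF h1, pvEndF h2,
        pvEndT h3, if_true, Bool.false_eq_true, if_false, hL1]
      simp only [normalize_judge_id_py_alt, pvScanWord, pvScanSep, hT1, hL1, pvEndT h3,
        if_true, pvCutAtUnder, Option.getD_some]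
      rw [if_neg (fun hc => hu ((pvInner15 value hn15).mp hc))]
      exact pvOut15 value hn15
  · have h1 : ¬ "__original_order".toList <:+ value.toList := fun h1 => by
      rw [show ("__original_order".toList) = '_' :: "_original_order".toList from by decide,
        pvConsSuffix] at h1
      exact h3 h1.1
    by_cases h2 : "__reverse_order".toList <:+ value.toList
    · -- double-underscore reverse variant
      have h4 : "_reverse_order".toList <:+ value.toList := by
        have := h2
        rw [show ("__reverse_order".toList) = '_' :: "_reverse_order".toList from by decide,
          pvConsSuffix] at this
        exact this.1
      have hu : ['_'] <:+ value.toList.take (value.toList.length - 14) := by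
        have := h2
        rw [show ("__reverse_order".toList) = '_' :: "_reverse_order".toList from by decide,
          pvConsSuffix] at this
        simpa using this.2
      have hn15 : 15 ≤ value.toList.length := by
        have := h2.length_le; simpa using this
      have h5 : ¬ "-original-order".toList <:+ value.toList := fun h5 =>
        absurd (List.suffix_of_suffix_length_le h2 h5 (by decide)) (by decide)
      simp only [normalize_judge_id_py, pvSuffixes, pvStripFirst, pvEndF h1, pvEndT h2,
        if_true, Bool.false_eq_true, if_false,
        show PySem.Str.len "__reverse_order" = 15 from by decide]
      simp only [normalize_judge_id_py_alt, pvScanWord, pvScanSep, hT1, hT2, hT3, hL1, hL2, hL3,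
        pvEndF h3, pvEndF h5, pvEndT h4, if_true, Bool.false_eq_true, if_false,
        pvCutAtUnder, Option.getD_some]
      rw [if_pos ((pvInner14 value (by omega)).mpr hu), show (PySem.Str.len value - 14 - 1) = (PySem.Str.len value - 15) from by ring]
      exact pvOut15 value hn15
    · by_cases h4 : "_reverse_order".toList <:+ value.toList
      · -- plain "_reverse_order"
        have hn14 : 14 ≤ value.toList.length := by
          have := h4.length_le; simpa using this
        have h5 : ¬ "-original-order".toList <:+ value.toList := fun h5 =>
          absurd (List.suffix_of_suffix_length_le h4 h5 (by decide)) (by decide)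
        have hu : ¬ ['_'] <:+ value.toList.take (value.toList.length - 14) := fun hu =>
          h2 (by
            rw [show ("__reverse_order".toList) = '_' :: "_reverse_order".toList from by decide,
              pvConsSuffix]
            exact ⟨h4, by simpa using hu⟩)
        simp only [normalize_judge_id_py, pvSuffixes, pvStripFirst, pvEndF h1, pvEndF h2,
          pvEndF h3, pvEndT h4, if_true, Bool.false_eq_true, if_false, hL3]
        simp only [normalize_judge_id_py_alt, pvScanWord, pvScanSep, hT1, hT2, hT3, hL1, hL2, hL3,
          pvEndF h3, pvEndF h5, pvEndT h4, if_true, Bool.false_eq_true, if_false,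
          pvCutAtUnder, Option.getD_some]
        rw [if_neg (fun hc => hu ((pvInner14 value hn14).mp hc))]
        exact pvOut14 value hn14
      · by_cases h5 : "-original-order".toList <:+ value.toList
        · -- dashed original
          have hn15 : 15 ≤ value.toList.length := by
            have := h5.length_le; simpa using this
          simp only [normalize_judge_id_py, pvSuffixes, pvStripFirst, pvEndF h1, pvEndF h2,
            pvEndF h3, pvEndF h4, pvEndT h5, if_true, Bool.false_eq_true, if_false, hL2]
          simp only [normalize_judge_id_py_alt, pvScanWord, pvScanSep, hT1, hT2, hL1, hL2,
            pvEndF h3, pvEndT h5, if_true, Bool.false_eq_true, if_false,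
            pvCutAtDash, Option.getD_some]
          exact pvOut15 value hn15
        · by_cases h6 : "-reverse-order".toList <:+ value.toList
          · -- dashed reverse
            have hn14 : 14 ≤ value.toList.length := by
              have := h6.length_le; simpa using this
            simp only [normalize_judge_id_py, pvSuffixes, pvStripFirst, pvEndF h1, pvEndF h2,
              pvEndF h3, pvEndF h4, pvEndF h5, pvEndT h6, if_true, Bool.false_eq_true, if_false,
              hL4]
            simp only [normalize_judge_id_py_alt, pvScanWord, pvScanSep, hT1, hT2, hT3, hT4,
              hL1, hL2, hL3, hL4, pvEndF h3, pvEndF h5, pvEndF h4, pvEndT h6,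
              if_true, Bool.false_eq_true, if_false, pvCutAtDash, Option.getD_some]
            exact pvOut14 value hn14
          · -- no suffix matches
            simp only [normalize_judge_id_py, pvSuffixes, pvStripFirst, pvEndF h1, pvEndF h2,
              pvEndF h3, pvEndF h4, pvEndF h5, pvEndF h6, Bool.false_eq_true, if_false]
            simp only [normalize_judge_id_py_alt, pvScanWord, pvScanSep, hT1, hT2, hT3, hT4,
              pvEndF h3, pvEndF h5, pvEndF h4, pvEndF h6, Bool.false_eq_true, if_false,
              Option.getD_none]

-- ===== VERDICT (by name: the statement is the Claim_ definition above) =====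
theorem normalize_judge_id_py_spec : Claim_equal_normalize_judge_id_py := by
  intro value _
  show normalize_judge_id_py value = normalize_judge_id_py_alt value
  exact pvKey value
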